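-- pv_equiv track=rewrite | github.com/Anagha99/master-branch | program.py | find_gudie
-- ===== SOURCE A (Python) =====
-- def find_gudie(items, m):
--     difference = None
--     start_gudie = None
--
--     for index, item in enumerate(items):
--         if index + (m - 1) >= len(items):
--             break
--
--         if difference is None:
--             start_gudie = 0
--             difference = items[m -1][1] - items[0][1]
--             continue
--         if items[index + m -1][1] - items[index][1] < difference:
--             start_gudie = index
--             difference = items[index + m -1][1] - items[index][1]
--
--     return start_gudie, difference
-- ===== SOURCE B (Python) =====
-- def find_gudie(items, m):
--     n = len(items)
--     starts = [i for i in range(n) if i + m - 1 < n]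
--     if not starts:
--         return None, None
--     order = sorted(starts, key=lambda i: items[i + m - 1][1] - items[i][1])
--     best = order[0]
--     return best, items[best + m - 1][1] - items[best][1]
-- ===== Notes on version B (the rewrite author's own statement) =====
-- stated objective: alternative
-- what changed: Replaces A's stateful running-minimum scan (break/continue, None-sentinel first iteration) by collecting the valid start indices, stably sorting them by the window difference, and taking the head of the sorted list; stability reproduces A's earliest-wins tie-breaking. Trades A's O(n) scan for an O(n log n) sort-then-pick.
import Mathlib
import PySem

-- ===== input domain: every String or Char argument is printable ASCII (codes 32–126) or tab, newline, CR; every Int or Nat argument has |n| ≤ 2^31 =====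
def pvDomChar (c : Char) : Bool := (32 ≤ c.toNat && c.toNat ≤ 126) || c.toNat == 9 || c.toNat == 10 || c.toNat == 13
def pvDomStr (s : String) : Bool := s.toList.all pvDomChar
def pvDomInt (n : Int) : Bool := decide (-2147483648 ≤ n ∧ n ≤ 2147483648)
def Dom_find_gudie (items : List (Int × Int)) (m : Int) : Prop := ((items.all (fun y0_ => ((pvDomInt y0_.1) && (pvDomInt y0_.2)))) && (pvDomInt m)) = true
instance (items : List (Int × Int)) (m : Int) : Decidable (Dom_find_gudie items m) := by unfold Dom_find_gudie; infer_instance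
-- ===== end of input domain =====

-- B replaces A's stateful running-minimum scan (break/continue, None-sentinel first iteration)
-- by collecting the valid start indices, stably sorting them by the window difference and taking
-- the head; stability reproduces A's earliest-wins tie-breaking. Objective: alternative.

-- ===== PORT A =====
-- the loop of A: consumes enumerate(items); state (start_gudie, difference)
def fgLoopA (items : List (Int × Int)) (m : Int) (l : List (Int × (Int × Int)))
    (start_ diff : Option Int) : Option Int × Option Int :=
  match l with
  | [] => (start_, diff)
  | (index, _item) :: rest =>
    if index + (m - 1) ≥ (items.length : Int) then (start_, diff)   -- break
    else
      match diff with
      | none =>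
          fgLoopA items m rest (some 0)
            (some ((PySem.List.pyGetD items (m - 1) (0, 0)).2 - (PySem.List.pyGetD items 0 (0, 0)).2))
      | some dv =>
          if (PySem.List.pyGetD items (index + m - 1) (0, 0)).2 - (PySem.List.pyGetD items index (0, 0)).2 < dv then
            fgLoopA items m rest (some index)
              (some ((PySem.List.pyGetD items (index + m - 1) (0, 0)).2 - (PySem.List.pyGetD items index (0, 0)).2))
          else
            fgLoopA items m rest start_ diff

def find_gudie (items : List (Int × Int)) (m : Int) : Option Int × Option Int :=
  fgLoopA items m (PySem.List.enumerate items) none none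

-- ===== PORT B =====
def find_gudie_alt (items : List (Int × Int)) (m : Int) : Option Int × Option Int :=
  let n : Int := items.length
  let starts := (PySem.List.pyRange 0 n 1).filter (fun i => decide (i + m - 1 < n))
  if starts = [] then (none, none)
  else
    let order := PySem.List.sorted starts (fun i =>
      (PySem.List.pyGetD items (i + m - 1) (0, 0)).2 - (PySem.List.pyGetD items i (0, 0)).2)
    let best := PySem.List.pyGetD order 0 0
    (some best, some ((PySem.List.pyGetD items (best + m - 1) (0, 0)).2 - (PySem.List.pyGetD items best (0, 0)).2))

-- ===== PRECONDITION & SPEC =====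
-- Pre_ excludes exactly the inputs on which the Python A raises IndexError
-- (a wrapped index below -len(items), reachable only when m ≤ 0); B raises there too.
def Pre_find_gudie (items : List (Int × Int)) (m : Int) : Prop :=
  items = [] ∨ 1 - (items.length : Int) ≤ m
instance (items : List (Int × Int)) (m : Int) : Decidable (Pre_find_gudie items m) := by
  unfold Pre_find_gudie; infer_instance

def pvWitness_find_gudie : (List (Int × Int)) × Int := ([(1, 4), (2, 7), (3, 8)], 2)

def Spec_find_gudie (items : List (Int × Int)) (m : Int) (out : Option Int × Option Int) : Prop := out = find_gudie_alt items m
instance (items : List (Int × Int)) (m : Int) (out : Option Int × Option Int) : Decidable (Spec_find_gudie items m out) := by unfold Spec_find_gudie; infer_instance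

-- ===== CLAIM (what is proved, stated in full; the proofs are below) =====
def Claim_equal_find_gudie : Prop := ∀ (items : List (Int × Int)) (m : Int), Dom_find_gudie items m → Pre_find_gudie items m → Spec_find_gudie items m (find_gudie items m)

-- ===== LEMMAS AND PROOFS =====

-- the per-window difference value
def fgD (items : List (Int × Int)) (m i : Int) : Int :=
  (PySem.List.pyGetD items (i + m - 1) (0, 0)).2 - (PySem.List.pyGetD items i (0, 0)).2

-- A's loop ignores the item component: restate it over bare indices
def fgLoopI (items : List (Int × Int)) (m : Int) (l : List Int)
    (start_ diff : Option Int) : Option Int × Option Int :=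
  match l with
  | [] => (start_, diff)
  | index :: rest =>
    if index + (m - 1) ≥ (items.length : Int) then (start_, diff)
    else
      match diff with
      | none => fgLoopI items m rest (some 0) (some (fgD items m 0))
      | some dv =>
          if fgD items m index < dv then
            fgLoopI items m rest (some index) (some (fgD items m index))
          else
            fgLoopI items m rest start_ diff

theorem fgLoopA_eq_I (items : List (Int × Int)) (m : Int) (l : List (Int × (Int × Int)))
    (start_ diff : Option Int) :
    fgLoopA items m l start_ diff = fgLoopI items m (l.map Prod.fst) start_ diff := by
  induction l generalizing start_ diff with
  | nil => rfl
  | cons p rest ih =>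
      obtain ⟨index, item⟩ := p
      cases diff with
      | none =>
          simp only [fgLoopA, fgLoopI, List.map, fgD, zero_add]
          split_ifs with h
          · rfl
          · rw [ih]
      | some dv =>
          simp only [fgLoopA, fgLoopI, List.map, fgD]
          split_ifs with h h2 <;> first | rfl | rw [ih]

theorem map_fst_enumerate (xs : List (Int × Int)) (s : Int) :
    (PySem.List.enumerate xs s).map Prod.fst = PySem.List.pyRange s (s + xs.length) 1 := by
  induction xs generalizing s with
  | nil => simp [PySem.List.enumerate_nil, PySem.List.pyRange_one_eq_nil]
  | cons x xs ih =>
      rw [PySem.List.enumerate_cons, List.map_cons,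
          PySem.List.pyRange_one_cons (by simp : s < s + ((x :: xs).length : Int))]
      simp only [List.length_cons, ih]
      congr 1
      push_cast; ring_nf

-- B's valid start indices from index s upward
def fgStarts (items : List (Int × Int)) (m s : Int) : List Int :=
  (PySem.List.pyRange s (items.length : Int) 1).filter
    (fun i => decide (i + m - 1 < (items.length : Int)))

-- the running strict minimum (earliest wins)
def fgMin (items : List (Int × Int)) (m : Int) (b x : Int) : Int :=
  if fgD items m x < fgD items m b then x else b

theorem fgStarts_empty (items : List (Int × Int)) (m s : Int)
    (h : (items.length : Int) ≤ s) : fgStarts items m s = [] := by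
  unfold fgStarts
  rw [PySem.List.pyRange_one_eq_nil h]
  rfl

theorem fgStarts_nil (items : List (Int × Int)) (m s : Int)
    (h : (items.length : Int) ≤ s + m - 1) : fgStarts items m s = [] := by
  unfold fgStarts
  rw [List.filter_eq_nil_iff]
  intro i hi
  have hmem := (PySem.List.mem_pyRange_one).1 hi
  simp only [decide_eq_true_eq]
  omega

theorem fgStarts_cons (items : List (Int × Int)) (m s : Int)
    (hs : s < (items.length : Int)) (hv : s + m - 1 < (items.length : Int)) :
    fgStarts items m s = s :: fgStarts items m (s + 1) := by
  unfold fgStarts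
  rw [PySem.List.pyRange_one_cons hs, List.filter_cons, if_pos (by simpa using hv)]

-- main invariant of A's loop: once diff is set to fgD si, the loop computes the running minimum
theorem fgLoop_min (items : List (Int × Int)) (m : Int) (k : Nat) :
    ∀ (s si : Int), s = (items.length : Int) - k →
    fgLoopI items m (PySem.List.pyRange s (items.length : Int) 1) (some si) (some (fgD items m si)) =
      (some ((fgStarts items m s).foldl (fgMin items m) si),
       some (fgD items m ((fgStarts items m s).foldl (fgMin items m) si))) := by
  induction k with
  | zero =>
      intro s si hs
      rw [PySem.List.pyRange_one_eq_nil (by omega), fgStarts_empty items m s (by omega)]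
      rfl
  | succ k ih =>
      intro s si hs
      by_cases hlen : s < (items.length : Int)
      · rw [PySem.List.pyRange_one_cons hlen]
        show fgLoopI items m (s :: _) _ _ = _
        simp only [fgLoopI]
        by_cases hg : s + (m - 1) ≥ (items.length : Int)
        · rw [if_pos hg, fgStarts_nil items m s (by omega)]
          rfl
        · rw [if_neg hg, fgStarts_cons items m s hlen (by omega)]
          simp only [List.foldl_cons]
          by_cases hlt : fgD items m s < fgD items m si
          · rw [if_pos hlt, ih (s + 1) s (by omega)]
            have : fgMin items m si s = s := by unfold fgMin; simp [hlt]
            rw [this]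
          · rw [if_neg hlt, ih (s + 1) si (by omega)]
            have : fgMin items m si s = si := by unfold fgMin; simp [hlt]
            rw [this]
      · rw [PySem.List.pyRange_one_eq_nil (by omega), fgStarts_empty items m s (by omega)]
        rfl

-- head of one insertion step
theorem insertBy_head {α : Type} (before : α → α → Bool) (x h : α) (t : List α) :
    ∃ t', PySem.List.insertBy before x (h :: t) = (if before x h then x else h) :: t' := by
  by_cases hb : before x h = true
  · exact ⟨h :: t, by simp [PySem.List.insertBy, hb]⟩
  · exact ⟨PySem.List.insertBy before x t, by simp [PySem.List.insertBy, hb]⟩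

-- head of the whole insertion-sort fold is the running "keep unless strictly smaller" minimum
theorem foldl_insertBy_head {α : Type} (before : α → α → Bool) (xs : List α) :
    ∀ (h : α) (t : List α), ∃ t',
      xs.foldl (fun acc x => PySem.List.insertBy before x acc) (h :: t) =
        (xs.foldl (fun b x => if before x b then x else b) h) :: t' := by
  induction xs with
  | nil => intro h t; exact ⟨t, rfl⟩
  | cons x xs ih =>
      intro h t
      obtain ⟨t1, h1⟩ := insertBy_head before x h t
      simp only [List.foldl_cons]
      rw [h1]
      exact ih _ t1

-- pointwise-equal folding functions give equal folds
theorem foldl_ext' {a b : Type} (f g : b -> a -> b) (h : forall x y, f x y = g x y) :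
    forall (l : List a) (init : b), l.foldl f init = l.foldl g init := by
  intro l
  induction l with
  | nil => intro init; rfl
  | cons x xs ih => intro init; simp only [List.foldl_cons, h]; exact ih _

-- head of sorted(c :: cs, key) is the running strict minimum of the key (earliest wins)
theorem sorted_head (items : List (Int × Int)) (m : Int) (c : Int) (cs : List Int) :
    ∃ t', PySem.List.sorted (c :: cs) (fun i =>
        (PySem.List.pyGetD items (i + m - 1) (0, 0)).2 - (PySem.List.pyGetD items i (0, 0)).2) false =
      (cs.foldl (fgMin items m) c) :: t' := by
  rw [PySem.List.sorted_eq_foldl_insertBy]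
  simp only [List.foldl_cons]
  obtain ⟨t', ht⟩ := foldl_insertBy_head
    (fun a b => decide ((PySem.List.pyGetD items (a + m - 1) (0, 0)).2 - (PySem.List.pyGetD items a (0, 0)).2 <
      (PySem.List.pyGetD items (b + m - 1) (0, 0)).2 - (PySem.List.pyGetD items b (0, 0)).2)) cs c []
  refine ⟨t', ?_⟩
  have hins : PySem.List.insertBy
      (fun a b => decide ((PySem.List.pyGetD items (a + m - 1) (0, 0)).2 - (PySem.List.pyGetD items a (0, 0)).2 <
        (PySem.List.pyGetD items (b + m - 1) (0, 0)).2 - (PySem.List.pyGetD items b (0, 0)).2)) c [] = [c] := rfl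
  rw [hins, ht]
  congr 1
  exact foldl_ext' _ (fgMin items m) (fun b x => by simp [fgMin, fgD]) cs c

-- ===== VERDICT (by name: the statement is the Claim_ definition above) =====
theorem find_gudie_spec : Claim_equal_find_gudie := by
  intro items m _hdom _hpre
  unfold Spec_find_gudie find_gudie find_gudie_alt
  rw [fgLoopA_eq_I, map_fst_enumerate]
  simp only [zero_add]
  by_cases hpos : 0 < (items.length : Int)
  · by_cases hv : m - 1 < (items.length : Int)
    · -- at least one valid window
      have hstarts : (PySem.List.pyRange 0 (items.length : Int) 1).filter
          (fun i => decide (i + m - 1 < (items.length : Int))) = 0 :: fgStarts items m 1 :=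
        fgStarts_cons items m 0 hpos (by omega)
      rw [hstarts, if_neg (by simp)]
      obtain ⟨t', ht⟩ := sorted_head items m 0 (fgStarts items m 1)
      rw [ht]
      have hbest : PySem.List.pyGetD (((fgStarts items m 1).foldl (fgMin items m) 0) :: t') 0 0 =
          (fgStarts items m 1).foldl (fgMin items m) 0 := by
        simp [PySem.List.pyGetD, PySem.List.pyGet?, PySem.List.pyIdx?]
      rw [hbest]
      rw [PySem.List.pyRange_one_cons hpos]
      show fgLoopI items m (0 :: _) none none = _
      simp only [fgLoopI]
      rw [if_neg (by omega)]
      have h01 : (0 : Int) + 1 = 1 := rfl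
      rw [h01, fgLoop_min items m ((items.length : Int) - 1).toNat 1 0 (by omega)]
      simp [fgD]
    · -- window longer than the list: A breaks at index 0, B has no valid starts
      have hnilf : (PySem.List.pyRange 0 (items.length : Int) 1).filter
          (fun i => decide (i + m - 1 < (items.length : Int))) = [] := by
        have := fgStarts_nil items m 0 (by omega)
        unfold fgStarts at this
        simpa using this
      rw [hnilf, if_pos rfl]
      rw [PySem.List.pyRange_one_cons hpos]
      show fgLoopI items m (0 :: _) none none = _
      simp only [fgLoopI]
      rw [if_pos (by omega)]
  · -- empty list
    rw [PySem.List.pyRange_one_eq_nil (by omega)]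
    simp [fgLoopI]
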